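-- pv_equiv track=rewrite | github.com/ulab-uiuc/AcademicEval | construct_relation_graph.py | arxiv_author_query_format
-- ===== SOURCE A (Python) =====
-- def arxiv_author_query_format(author):
--     ret = ""
--     decompose_author = author.split(" ")
--     for ind, part in enumerate(decompose_author):
--         ret += "au:" + part
--         if ind != len(decompose_author) - 1:
--             ret += " AND "
--
--     return ret
-- ===== SOURCE B (Python) =====
-- def arxiv_author_query_format(author):
--     return "au:" + author.replace(" ", " AND au:")
-- ===== Notes on version B (the rewrite author's own statement) =====
-- stated objective: simpler
-- what changed: Replaced the split/enumerate loop that rebuilds the string part by part with a single expression: prefix the tag once and turn every space into the separator-plus-tag via str.replace.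
import Mathlib
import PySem

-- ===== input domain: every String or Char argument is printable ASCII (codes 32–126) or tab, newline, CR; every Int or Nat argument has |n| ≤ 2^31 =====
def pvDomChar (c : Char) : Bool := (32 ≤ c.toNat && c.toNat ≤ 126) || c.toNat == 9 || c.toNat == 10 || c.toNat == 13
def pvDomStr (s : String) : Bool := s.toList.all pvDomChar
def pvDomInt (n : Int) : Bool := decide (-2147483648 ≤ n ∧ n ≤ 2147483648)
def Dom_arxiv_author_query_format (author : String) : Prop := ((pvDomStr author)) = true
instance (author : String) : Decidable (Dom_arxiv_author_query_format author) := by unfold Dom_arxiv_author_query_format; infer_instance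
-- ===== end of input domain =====

-- B replaces A's split/enumerate accumulation loop with a single prefix + str.replace; objective: simpler.

-- ===== PORT A =====
-- author.split(" "): the separator is the nonempty literal " ", so PySem.Chars.splitOn is exact here.
def arxiv_author_query_format (author : String) : String :=
  let decompose_author : List (List Char) := PySem.Chars.splitOn author.toList [' ']
  let ret : List Char :=
    (PySem.List.enumerate decompose_author 0).foldl
      (fun ret p =>
        let ret := ret ++ ("au:".toList ++ p.2)
        if p.1 ≠ (decompose_author.length : Int) - 1 then ret ++ " AND ".toList else ret)
      []
  String.ofList ret

-- ===== PORT B =====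
def arxiv_author_query_format_alt (author : String) : String :=
  "au:" ++ PySem.Str.replace author " " " AND au:"

-- ===== PRECONDITION & SPEC =====
def Spec_arxiv_author_query_format (author : String) (out : String) : Prop := out = arxiv_author_query_format_alt author
instance (author : String) (out : String) : Decidable (Spec_arxiv_author_query_format author out) := by unfold Spec_arxiv_author_query_format; infer_instance

-- ===== CLAIM (what is proved, stated in full; the proofs are below) =====
def Claim_equal_arxiv_author_query_format : Prop := ∀ (author : String), Dom_arxiv_author_query_format author → Spec_arxiv_author_query_format author (arxiv_author_query_format author)

-- ===== LEMMAS AND PROOFS =====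

-- recursive characterisation of splitting on a single space
def pvSplit1 : List Char → List (List Char)
  | [] => [[]]
  | c :: t =>
    if c = ' ' then [] :: pvSplit1 t
    else
      match pvSplit1 t with
      | p :: ps => (c :: p) :: ps
      | [] => [[c]]

-- recursive characterisation of replacing each space by " AND au:"
def pvTail : List Char → List Char
  | [] => []
  | c :: t => if c = ' ' then " AND au:".toList ++ pvTail t else c :: pvTail t

def pvConsHead (pre : List Char) : List (List Char) → List (List Char)
  | p :: ps => (pre ++ p) :: ps
  | [] => [pre]

lemma pvSplit1_ne_nil (cs : List Char) : pvSplit1 cs ≠ [] := by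
  cases cs with
  | nil => simp [pvSplit1]
  | cons c t =>
    simp only [pvSplit1]
    split
    · simp
    · cases h : pvSplit1 t <;> simp

lemma splitOn_go_eq : ∀ (fuel : Nat) (l cur : List Char) (acc : List (List Char)), l.length ≤ fuel →
    PySem.Chars.splitOn.go [' '] fuel l cur acc = acc.reverse ++ pvConsHead cur.reverse (pvSplit1 l) := by
  intro fuel
  induction fuel with
  | zero =>
    intro l cur acc h
    have : l = [] := by cases l <;> simp_all
    subst this
    simp [PySem.Chars.splitOn.go, pvSplit1, pvConsHead]
  | succ fuel ih =>
    intro l cur acc h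
    cases l with
    | nil => simp [PySem.Chars.splitOn.go, pvSplit1, pvConsHead]
    | cons c rest =>
      simp only [PySem.Chars.splitOn.go]
      by_cases hc : c = ' '
      · subst hc
        simp only [List.isPrefixOf, BEq.rfl, Bool.true_and, if_pos, List.length_cons,
          List.length_nil, List.drop_succ_cons, List.drop_zero]
        rw [ih rest [] (List.reverse cur :: acc) (by simpa using Nat.le_of_succ_le_succ h)]
        obtain ⟨p, ps, hps⟩ : ∃ p ps, pvSplit1 rest = p :: ps := by
          cases hs : pvSplit1 rest with
          | nil => exact absurd hs (pvSplit1_ne_nil rest)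
          | cons p ps => exact ⟨p, ps, rfl⟩
        simp [pvSplit1, hps, pvConsHead]
      · have hpre : [' '].isPrefixOf (c :: rest) = false := by
          simp [List.isPrefixOf]
          exact fun h' => hc h'.symm
        rw [hpre]
        simp only [Bool.false_eq_true, if_false]
        rw [ih rest (c :: cur) acc (by simpa using Nat.le_of_succ_le_succ h)]
        obtain ⟨p, ps, hps⟩ : ∃ p ps, pvSplit1 rest = p :: ps := by
          cases hs : pvSplit1 rest with
          | nil => exact absurd hs (pvSplit1_ne_nil rest)
          | cons p ps => exact ⟨p, ps, rfl⟩
        simp [pvSplit1, hc, hps, pvConsHead]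
  
lemma splitOn_eq_pvSplit1 (cs : List Char) : PySem.Chars.splitOn cs [' '] = pvSplit1 cs := by
  rw [PySem.Chars.splitOn, splitOn_go_eq (cs.length + 1) cs [] [] (Nat.le_succ _)]
  obtain ⟨p, ps, hps⟩ : ∃ p ps, pvSplit1 cs = p :: ps := by
    cases hs : pvSplit1 cs with
    | nil => exact absurd hs (pvSplit1_ne_nil cs)
    | cons p ps => exact ⟨p, ps, rfl⟩
  simp [hps, pvConsHead]

lemma replace_go_eq : ∀ (fuel : Nat) (l acc : List Char), l.length ≤ fuel →
    PySem.Chars.replace.go [' '] " AND au:".toList fuel l acc = acc.reverse ++ pvTail l := by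
  intro fuel
  induction fuel with
  | zero =>
    intro l acc h
    have : l = [] := by cases l <;> simp_all
    subst this
    simp [PySem.Chars.replace.go, pvTail]
  | succ fuel ih =>
    intro l acc h
    cases l with
    | nil => simp [PySem.Chars.replace.go, pvTail]
    | cons c rest =>
      simp only [PySem.Chars.replace.go]
      by_cases hc : c = ' '
      · subst hc
        simp only [List.isPrefixOf, BEq.rfl, Bool.true_and, if_pos, List.length_cons,
          List.length_nil, List.drop_succ_cons, List.drop_zero]
        rw [ih rest _ (by simpa using Nat.le_of_succ_le_succ h)]
        simp [pvTail]
      · have hpre : [' '].isPrefixOf (c :: rest) = false := by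
          simp [List.isPrefixOf]
          exact fun h' => hc h'.symm
        rw [hpre]
        simp only [Bool.false_eq_true, if_false]
        rw [ih rest (c :: acc) (by simpa using Nat.le_of_succ_le_succ h)]
        simp [pvTail, hc]

-- the value A's loop builds from a list of parts (when those parts end at the last index)
def pvJ : List (List Char) → List Char
  | [] => []
  | [p] => "au:".toList ++ p
  | p :: ps@(_ :: _) => "au:".toList ++ p ++ " AND ".toList ++ pvJ ps

lemma foldA_eq (n : Int) : ∀ (parts : List (List Char)) (s : Int) (acc : List Char),
    s + parts.length = n →
    (PySem.List.enumerate parts s).foldl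
      (fun ret p =>
        let ret := ret ++ ("au:".toList ++ p.2)
        if p.1 ≠ n - 1 then ret ++ " AND ".toList else ret) acc
      = acc ++ pvJ parts := by
  intro parts
  induction parts with
  | nil => intro s acc _; simp [PySem.List.enumerate_nil, pvJ]
  | cons p ps ih =>
    intro s acc hn
    rw [PySem.List.enumerate_cons]
    cases ps with
    | nil =>
      have hs : s = n - 1 := by simp at hn; omega
      simp [PySem.List.enumerate_nil, hs, pvJ]
    | cons q qs =>
      have hs : s ≠ n - 1 := by simp at hn; omega
      simp only [List.foldl_cons, ne_eq, hs, not_false_iff, if_true]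
      rw [ih (s + 1) _ (by simp at hn ⊢; omega)]
      simp [pvJ, List.append_assoc]

lemma pvJ_pvSplit1 (cs : List Char) : pvJ (pvSplit1 cs) = "au:".toList ++ pvTail cs := by
  induction cs with
  | nil => simp [pvSplit1, pvJ, pvTail]
  | cons c t ih =>
    obtain ⟨p, ps, hps⟩ : ∃ p ps, pvSplit1 t = p :: ps := by
      cases hs : pvSplit1 t with
      | nil => exact absurd hs (pvSplit1_ne_nil t)
      | cons p ps => exact ⟨p, ps, rfl⟩
    by_cases hc : c = ' '
    · subst hc
      have h1 : pvSplit1 (' ' :: t) = [] :: p :: ps := by simp [pvSplit1, hps]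
      have h2 : pvJ ([] :: p :: ps) = "au:".toList ++ [] ++ " AND ".toList ++ pvJ (p :: ps) := by simp [pvJ]
      rw [h1, h2, ← hps, ih]
      have h3 : (" AND au:".toList : List Char) = " AND ".toList ++ "au:".toList := by decide
      simp [pvTail, h3]
    · have h1 : pvSplit1 (c :: t) = (c :: p) :: ps := by simp [pvSplit1, hc, hps]
      rw [h1]
      rw [hps] at ih
      cases ps with
      | nil =>
        have h2 : pvJ [c :: p] = "au:".toList ++ (c :: p) := by simp [pvJ]
        have h4 : pvJ [p] = "au:".toList ++ p := by simp [pvJ]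
        rw [h4] at ih
        have hp : p = pvTail t := List.append_cancel_left ih
        rw [h2, hp]
        simp [pvTail, hc]
      | cons q qs =>
        have h2 : pvJ ((c :: p) :: q :: qs) = "au:".toList ++ (c :: p) ++ " AND ".toList ++ pvJ (q :: qs) := by simp [pvJ]
        have h4 : pvJ (p :: q :: qs) = "au:".toList ++ p ++ " AND ".toList ++ pvJ (q :: qs) := by simp [pvJ]
        rw [h4] at ih
        have hp : p ++ (" AND ".toList ++ pvJ (q :: qs)) = pvTail t := by
          apply List.append_cancel_left (as := "au:".toList)
          simpa [List.append_assoc] using ih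
        rw [h2]
        simp only [pvTail, hc, if_false]
        rw [← hp]
        simp [List.append_assoc]

-- ===== VERDICT (by name: the statement is the Claim_ definition above) =====
theorem arxiv_author_query_format_spec : Claim_equal_arxiv_author_query_format := by
  intro author _
  unfold Spec_arxiv_author_query_format arxiv_author_query_format arxiv_author_query_format_alt
  apply String.toList_inj.mp
  simp only [String.toList_append, PySem.Str.toList_replace]
  have hsep : (" " : String).toList = [' '] := by decide
  rw [hsep]
  have hrep : PySem.Chars.replace author.toList [' '] " AND au:".toList = pvTail author.toList := by
    rw [PySem.Chars.replace]
    simp only [List.isEmpty_cons, Bool.false_eq_true, if_false]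
    exact replace_go_eq author.toList.length author.toList [] (le_refl _)
  rw [hrep]
  rw [splitOn_eq_pvSplit1]
  rw [foldA_eq ((pvSplit1 author.toList).length : Int) (pvSplit1 author.toList) 0 [] (by simp)]
  simp only [List.nil_append]
  rw [pvJ_pvSplit1]
  simp
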